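-- pv_equiv track=rewrite | github.com/Jagermeister/expeditions | player.py | cards_score
-- ===== SOURCE A (Python) =====
-- def cards_score(cards):
--     score = -20
--     betCount = 1
--     i = 0
--     while i < 3:
--         betCount += cards & 0b1
--         cards >>= 1
--         i += 1
--
--     i = 2
--     while cards:
--         score += i * (cards & 0b1)
--         cards >>= 1
--         i += 1
--     return score * betCount
-- ===== SOURCE B (Python) =====
-- def cards_score(cards):
--     # betCount from the low three bits; the weighted score via the telescoping
--     # popcount identity: sum_k k*bit_k(h) = sum_{t>=1} popcount(h >> t),
--     # so the per-bit weights disappear and we only cascade popcounts.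
--     low, high = cards & 7, cards >> 3
--     betCount = 1 + bin(low).count("1")
--     total = 2 * bin(high).count("1")
--     h = high >> 1
--     while h:
--         total += bin(h).count("1")
--         h >>= 1
--     return (total - 20) * betCount
-- ===== Notes on version B (the rewrite author's own statement) =====
-- stated objective: alternative
-- what changed: Replaces A's per-bit weighted accumulation (score += i * bit at each shift) by the telescoping-popcount identity sum_k k*bit_k(h) = sum_{t>=1} popcount(h >> t): B splits cards into low/high at bit 3, takes betCount from popcount of the low part, and computes the weighted score by cascading whole-word popcounts of successive right-shifts, never weighting individual bits.
import Mathlib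
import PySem

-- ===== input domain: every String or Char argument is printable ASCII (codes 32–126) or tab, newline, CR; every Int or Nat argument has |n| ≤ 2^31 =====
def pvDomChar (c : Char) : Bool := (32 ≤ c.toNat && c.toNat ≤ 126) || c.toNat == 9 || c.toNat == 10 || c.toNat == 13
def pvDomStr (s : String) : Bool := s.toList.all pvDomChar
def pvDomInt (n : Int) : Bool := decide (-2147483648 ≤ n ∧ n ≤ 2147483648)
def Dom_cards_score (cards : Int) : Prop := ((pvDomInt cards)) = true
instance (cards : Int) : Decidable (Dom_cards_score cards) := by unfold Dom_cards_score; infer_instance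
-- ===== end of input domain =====

-- B computes the weighted score by cascading popcounts of successive right-shifts
-- (telescoping identity) instead of A's per-bit weighted shift loops (objective: alternative).

-- ===== PORT A =====
-- 'while cards:' — fuel-bounded recursion; the fuel c.toNat is ≥ the number of iterations
-- whenever c ≥ 0 (the loop halves c each step); on negative cards Python A never terminates,
-- which Pre_cards_score excludes.
def pvALoop : Nat → Int → Int → Int → Int
  | 0, _, _, score => score
  | fuel + 1, c, i, score =>
    if c = 0 then score
    else pvALoop fuel (c >>> (1 : Nat)) (i + 1) (score + i * PySem.Int.band c 1)

def cards_score (cards : Int) : Int :=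
  -- first loop: i = 0; while i < 3: betCount += cards & 1; cards >>= 1
  let st := (List.range 3).foldl
    (fun (st : Int × Int) _ => (st.1 + PySem.Int.band st.2 1, st.2 >>> (1 : Nat))) ((1 : Int), cards)
  -- second loop: i = 2; while cards: score += i * (cards & 1); cards >>= 1
  pvALoop st.2.toNat st.2 2 (-20) * st.1

-- ===== PORT B =====
-- 'while h:' — fuel-bounded recursion, fuel h.toNat suffices for h ≥ 0 (h halves each step);
-- on negative cards the Python loop never terminates, which Pre_cards_score excludes.
-- bin(x).count("1") for x ≥ 0 is the popcount: PySem.Int.bitCount.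
def pvBLoop : Nat → Int → Int → Int
  | 0, _, total => total
  | fuel + 1, h, total =>
    if h = 0 then total
    else pvBLoop fuel (h >>> (1 : Nat)) (total + (PySem.Int.bitCount h : Int))

def cards_score_alt (cards : Int) : Int :=
  let low := PySem.Int.band cards 7
  let high := cards >>> (3 : Nat)
  let betCount : Int := 1 + (PySem.Int.bitCount low : Int)
  let total : Int := 2 * (PySem.Int.bitCount high : Int)
  let h := high >>> (1 : Nat)
  (pvBLoop h.toNat h total - 20) * betCount

-- ===== PRECONDITION & SPEC =====
-- Pre_ excludes negative cards: there both Pythons' 'while' loops never terminate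
-- ('x >>= 1' stays at -1), so A returns no value.
def Pre_cards_score (cards : Int) : Prop := 0 ≤ cards
instance (cards : Int) : Decidable (Pre_cards_score cards) := by unfold Pre_cards_score; infer_instance
def pvWitness_cards_score : Int := (13)

def Spec_cards_score (cards : Int) (out : Int) : Prop := out = cards_score_alt cards
instance (cards : Int) (out : Int) : Decidable (Spec_cards_score cards out) := by unfold Spec_cards_score; infer_instance

-- ===== CLAIM (what is proved, stated in full; the proofs are below) =====
def Claim_equal_cards_score : Prop := ∀ (cards : Int), Dom_cards_score cards → Pre_cards_score cards → Spec_cards_score cards (cards_score cards)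

-- ===== LEMMAS AND PROOFS =====

-- the value A's second loop adds to its score argument, as a function of the remaining bits
def pvW (m : Nat) (i : Int) : Int :=
  if h : m = 0 then 0 else i * ((m % 2 : Nat) : Int) + pvW (m / 2) (i + 1)
  decreasing_by exact Nat.div_lt_self (Nat.pos_of_ne_zero h) (by omega)

-- the cascade of popcounts B's while-loop accumulates
def pvCasc (m : Nat) : Int :=
  if h : m = 0 then 0 else (PySem.Int.bitCount (m : Int) : Int) + pvCasc (m / 2)
  decreasing_by exact Nat.div_lt_self (Nat.pos_of_ne_zero h) (by omega)

theorem pvBandOne (m : Nat) : PySem.Int.band (m : Int) 1 = ((m &&& 1 : Nat) : Int) := by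
  have h := PySem.Int.band_natCast m 1
  simpa using h

theorem pvBandSeven (m : Nat) : PySem.Int.band (m : Int) 7 = ((m &&& 7 : Nat) : Int) := by
  have h := PySem.Int.band_natCast m 7
  simpa using h

theorem pvCastShift (m k : Nat) : ((m : Int) >>> k) = ((m >>> k : Nat) : Int) := by
  simp [Int.shiftRight_eq_div_pow, Nat.shiftRight_eq_div_pow]

theorem pvALoop_eq (fuel : Nat) : ∀ (m : Nat) (i s : Int), m ≤ fuel →
    pvALoop fuel (m : Int) i s = s + pvW m i := by
  induction fuel with
  | zero =>
    intro m i s hm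
    have : m = 0 := by omega
    subst this
    simp [pvALoop, pvW]
  | succ f ih =>
    intro m i s hm
    by_cases h0 : m = 0
    · subst h0; simp [pvALoop, pvW]
    · have hne : (m : Int) ≠ 0 := by exact_mod_cast h0
      rw [pvALoop]
      simp only [hne, if_false]
      rw [pvCastShift m 1, pvBandOne m]
      have h1 : m >>> 1 = m / 2 := Nat.shiftRight_one m
      have h2 : m &&& 1 = m % 2 := Nat.and_one_is_mod m
      rw [h1, h2, ih (m / 2) (i + 1) _ (by omega)]
      conv_rhs => rw [pvW, dif_neg h0]
      ring

theorem pvBLoop_eq (fuel : Nat) : ∀ (m : Nat) (t : Int), m ≤ fuel →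
    pvBLoop fuel (m : Int) t = t + pvCasc m := by
  induction fuel with
  | zero =>
    intro m t hm
    have : m = 0 := by omega
    subst this
    simp [pvBLoop, pvCasc]
  | succ f ih =>
    intro m t hm
    by_cases h0 : m = 0
    · subst h0; simp [pvBLoop, pvCasc]
    · have hne : (m : Int) ≠ 0 := by exact_mod_cast h0
      rw [pvBLoop]
      simp only [hne, if_false]
      rw [pvCastShift m 1, Nat.shiftRight_one m, ih (m / 2) _ (by omega)]
      conv_rhs => rw [pvCasc, dif_neg h0]
      ring

-- telescoping-popcount identity: A's weighted sum equals i·popcount(m) plus B's cascade of m/2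
theorem pvW_casc (m : Nat) : ∀ (i : Int),
    pvW m i = i * (PySem.Int.bitCount (m : Int) : Int) + pvCasc (m / 2) := by
  induction m using Nat.strong_induction_on with
  | _ m ih =>
    intro i
    by_cases h0 : m = 0
    · subst h0
      rw [pvW, pvCasc]
      simp
    · have hpos : 0 < m := Nat.pos_of_ne_zero h0
      rw [pvW, dif_neg h0, ih (m / 2) (Nat.div_lt_self hpos (by omega)) (i + 1)]
      rw [PySem.Int.bitCount_natCast (m := m) hpos]
      by_cases h2 : m / 2 = 0
      · rw [h2]
        rw [show pvCasc 0 = 0 from by rw [pvCasc]; simp]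
        simp
      · conv_rhs => rw [pvCasc, dif_neg h2]
        push_cast
        ring

-- A's first loop unrolled, compared with B's popcount of the low three bits
theorem pvBetCount (n : Nat) :
    (1 : Int) + PySem.Int.band (n : Int) 1 + PySem.Int.band ((n >>> 1 : Nat) : Int) 1
      + PySem.Int.band ((n >>> 2 : Nat) : Int) 1
    = 1 + (PySem.Int.bitCount (PySem.Int.band (n : Int) 7) : Int) := by
  rw [pvBandOne n, pvBandOne (n >>> 1), pvBandOne (n >>> 2), pvBandSeven n]
  have e1 : n &&& 1 = n % 2 := Nat.and_one_is_mod n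
  have e2 : n >>> 1 &&& 1 = n / 2 % 2 := by rw [Nat.shiftRight_one, Nat.and_one_is_mod]
  have e3 : n >>> 2 &&& 1 = n / 2 / 2 % 2 := by
    rw [Nat.shiftRight_succ, Nat.shiftRight_one, Nat.and_one_is_mod]
  have e7 : n &&& 7 = n % 8 := by
    have : 7 = 2 ^ 3 - 1 := by norm_num
    rw [this, Nat.and_two_pow_sub_one_eq_mod]
  rw [e1, e2, e3, e7]
  have ha : n % 2 = n % 8 % 2 := by omega
  have hb : n / 2 % 2 = n % 8 / 2 % 2 := by omega
  have hc : n / 2 / 2 % 2 = n % 8 / 4 % 2 := by omega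
  rw [ha, hb, hc]
  have h8 : n % 8 < 8 := Nat.mod_lt n (by omega)
  set r := n % 8 with hr
  clear_value r
  interval_cases r <;> decide

-- ===== VERDICT (by name: the statement is the Claim_ definition above) =====
theorem cards_score_spec : Claim_equal_cards_score := by
  intro cards _ hpre
  unfold Spec_cards_score cards_score cards_score_alt
  obtain ⟨n, rfl⟩ : ∃ n : Nat, cards = (n : Int) := ⟨cards.toNat, (Int.toNat_of_nonneg hpre).symm⟩
  simp only [List.range_succ, List.range_zero, List.foldl_cons, List.foldl_nil, List.foldl_append]
  simp only [pvCastShift]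
  rw [show n >>> 1 >>> 1 >>> 1 = n >>> 3 from by
    simp [Nat.shiftRight_succ, Nat.shiftRight_zero]]
  rw [show n >>> 1 >>> 1 = n >>> 2 from by
    simp [Nat.shiftRight_succ, Nat.shiftRight_zero]]
  rw [show n >>> 3 >>> 1 = n >>> 3 / 2 from Nat.shiftRight_one _]
  simp only [Int.toNat_natCast]
  rw [pvALoop_eq (n >>> 3) (n >>> 3) 2 (-20) (le_refl _)]
  rw [pvBLoop_eq (n >>> 3 / 2) (n >>> 3 / 2) _ (le_refl _)]
  rw [pvBetCount n, pvW_casc (n >>> 3) 2]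
  ring
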